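-- pv_equiv track=rewrite | github.com/davidemodolo/AoC23 | 7th/main1.py | isOneTriple
-- ===== SOURCE A (Python) =====
-- def isOneTriple(hand):
--     potential_triple = {}
--     for card in hand:
--         if card in potential_triple:
--             potential_triple[card] += 1
--         else:
--             potential_triple[card] = 1
--     return len([card for card in potential_triple if potential_triple[card] == 3])>0
-- ===== SOURCE B (Python) =====
-- def isOneTriple(hand):
--     found = False
--     cur = None
--     run = 0
--     for card in sorted(hand):
--         if card == cur:
--             run += 1
--         else:
--             if run == 3:
--                 found = True
--             cur = card
--             run = 1
--     return found or run == 3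
-- ===== Notes on version B (the rewrite author's own statement) =====
-- stated objective: alternative
-- what changed: Replaces the frequency dictionary plus key-filter pass by a sort-then-run-length scan: B sorts the hand and walks it once tracking the current run, flagging any run of length exactly 3.
import Mathlib
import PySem

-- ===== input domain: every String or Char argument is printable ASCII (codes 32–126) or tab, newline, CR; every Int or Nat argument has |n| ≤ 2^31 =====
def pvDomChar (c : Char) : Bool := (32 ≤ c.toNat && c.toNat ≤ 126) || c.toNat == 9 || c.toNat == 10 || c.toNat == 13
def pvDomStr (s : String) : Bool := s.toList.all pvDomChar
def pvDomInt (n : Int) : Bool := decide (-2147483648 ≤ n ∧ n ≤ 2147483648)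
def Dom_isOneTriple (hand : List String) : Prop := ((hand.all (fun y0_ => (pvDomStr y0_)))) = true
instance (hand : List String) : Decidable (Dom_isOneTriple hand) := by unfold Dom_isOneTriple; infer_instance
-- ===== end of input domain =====

-- B replaces A's frequency dictionary by a sort-then-run-length scan (alternative decomposition, same results).

-- ===== PORT A =====
def isOneTriple (hand : List String) : Bool :=
  let d : PySem.Dict String Int := hand.foldl
    (fun d card => if d.contains card then d.insert card (d.getD card 0 + 1) else d.insert card 1)
    PySem.Dict.empty
  decide (((d.keys.filter (fun card => d.getD card 0 == 3)).length) > 0)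

-- ===== PORT B =====
def pyScan (cur : Option String) (run : Int) (found : Bool) : List String → Bool
  | [] => found || decide (run = 3)
  | card :: rest =>
    if some card == cur then pyScan cur (run + 1) found rest
    else pyScan (some card) 1 (found || decide (run = 3)) rest

def isOneTriple_alt (hand : List String) : Bool :=
  pyScan none 0 false (PySem.List.sorted hand (fun x => x) false)

-- ===== PRECONDITION & SPEC =====
def Spec_isOneTriple (hand : List String) (out : Bool) : Prop := out = isOneTriple_alt hand
instance (hand : List String) (out : Bool) : Decidable (Spec_isOneTriple hand out) := by unfold Spec_isOneTriple; infer_instance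

-- ===== CLAIM (what is proved, stated in full; the proofs are below) =====
def Claim_equal_isOneTriple : Prop := ∀ (hand : List String), Dom_isOneTriple hand → Spec_isOneTriple hand (isOneTriple hand)

-- ===== LEMMAS AND PROOFS =====

-- "some card has count exactly 3" as both programs ultimately compute it
def pvGoal (l : List String) : Bool := l.any (fun v => l.count v == 3)

theorem pvGoal_perm {l m : List String} (h : l.Perm m) : pvGoal l = pvGoal m := by
  rw [Bool.eq_iff_iff]
  simp only [pvGoal, List.any_eq_true]
  constructor
  · rintro ⟨v, hv, hc⟩
    exact ⟨v, h.mem_iff.mp hv, by rwa [← h.count_eq]⟩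
  · rintro ⟨v, hv, hc⟩
    exact ⟨v, h.mem_iff.mpr hv, by rwa [h.count_eq]⟩

theorem pvGoal_cons (x : String) (t : List String) :
    pvGoal (x :: t) = ((t.count x + 1 == 3) || pvGoal (t.filter (fun v => !(v == x)))) := by
  rw [Bool.eq_iff_iff]
  simp only [pvGoal, List.any_eq_true, Bool.or_eq_true, beq_iff_eq, List.mem_filter,
    List.mem_cons, Bool.not_eq_eq_eq_not, Bool.not_true, beq_eq_false_iff_ne, ne_eq,
    List.count_cons]
  constructor
  · rintro ⟨v, hv, hc⟩
    by_cases hvx : v = x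
    · left
      simp [hvx] at hc ⊢
      omega
    · right
      rcases hv with hv | hv
      · exact absurd hv hvx
      refine ⟨v, ⟨hv, hvx⟩, ?_⟩
      have hxv : ¬ x = v := fun h => hvx h.symm
      simp [List.count_filter, hvx, hxv] at hc ⊢
      omega
  · rintro (hc | ⟨v, ⟨hv, hvx⟩, hc⟩)
    · refine ⟨x, Or.inl rfl, ?_⟩
      simp at hc ⊢
      omega
    · refine ⟨v, Or.inr hv, ?_⟩
      have hxv : ¬ x = v := fun h => hvx h.symm
      simp [List.count_filter, hvx, hxv] at hc ⊢
      omega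

theorem fold_eq_counter (hand : List String) :
    hand.foldl
      (fun d card => if d.contains card then d.insert card (d.getD card 0 + 1) else d.insert card 1)
      (PySem.Dict.empty : PySem.Dict String Int)
    = PySem.Dict.counter hand := by
  have hstep : (fun (d : PySem.Dict String Int) card =>
      if d.contains card then d.insert card (d.getD card 0 + 1) else d.insert card 1)
      = (fun d card => d.insert card (d.getD card 0 + 1)) := by
    funext d card
    by_cases h : d.contains card = true
    · simp [h]
    · have h' : d.contains card = false := by simpa using h
      rw [if_neg (by simp [h']), PySem.Dict.getD_of_not_contains d (0 : Int) h']
      norm_num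
  rw [hstep, PySem.Dict.foldl_insert_getD_add_one_eq_counter]

theorem A_eq_goal (hand : List String) : isOneTriple hand = pvGoal hand := by
  rw [Bool.eq_iff_iff]
  simp only [isOneTriple, fold_eq_counter, PySem.Dict.keys_counter, PySem.Dict.getD_counter,
    decide_eq_true_eq, List.length_pos_iff_exists_mem, List.mem_filter, pvGoal, List.any_eq_true]
  constructor
  · rintro ⟨v, hv, hc⟩
    refine ⟨v, (PySem.Set.mem_ofList _ _).mp hv, ?_⟩
    simp only [beq_iff_eq] at hc ⊢
    exact_mod_cast hc
  · rintro ⟨v, hv, hc⟩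
    refine ⟨v, (PySem.Set.mem_ofList _ _).mpr hv, ?_⟩
    simp only [beq_iff_eq] at hc ⊢
    exact_mod_cast hc

theorem pyScan_eq (l : List String) : ∀ (c : String) (run : Int) (found : Bool),
    l.Pairwise (· ≤ ·) → (∀ x ∈ l, c ≤ x) →
    pyScan (some c) run found l
      = (found || decide (run + (l.count c : Int) = 3) || pvGoal (l.filter (fun v => !(v == c)))) := by
  induction l with
  | nil =>
    intro c run found _ _
    simp [pyScan, pvGoal]
  | cons x t ih =>
    intro c run found hpw hle
    rcases List.pairwise_cons.mp hpw with ⟨hxt, hpt⟩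
    by_cases hxc : x = c
    · subst hxc
      rw [pyScan]
      simp only [BEq.rfl, if_pos]
      rw [ih x (run + 1) found hpt hxt]
      have hcnt : ((x :: t).count x : Int) = (t.count x : Int) + 1 := by
        simp
      have : decide (run + 1 + (t.count x : Int) = 3)
           = decide (run + ((x :: t).count x : Int) = 3) := by
        rw [hcnt]; apply decide_eq_decide.mpr; constructor <;> intro <;> omega
      rw [this]
      congr 1
      simp
    · -- x ≠ c : the run of c is over (c never occurs again)
      have hcx : c < x := lt_of_le_of_ne (hle x (List.mem_cons_self)) (Ne.symm hxc)
      have hcnt : c ∉ t := fun hc => absurd (hxt c hc) (not_le.mpr hcx)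
      have hxcb : (x == c) = false := by simp [hxc]
      rw [pyScan]
      simp only [Option.some_beq_some, hxcb, Bool.false_eq_true, if_neg, not_false_iff]
      rw [ih x 1 (found || decide (run = 3)) hpt hxt]
      have h1 : ((x :: t).count c : Int) = 0 := by
        simp [List.count_cons, hxcb, List.count_eq_zero.mpr hcnt]
      have h2 : (x :: t).filter (fun v => !(v == c)) = x :: t := by
        rw [List.filter_cons_of_pos (by simp [hxc])]
        congr 1
        exact List.filter_eq_self.mpr (fun v hv => by
          simp only [Bool.not_eq_eq_eq_not, Bool.not_true, beq_eq_false_iff_ne]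
          exact fun h => hcnt (by rwa [h] at hv))
      rw [h1, h2, pvGoal_cons]
      have h3 : decide (run + (0 : Int) = 3) = decide (run = 3) := by
        apply decide_eq_decide.mpr; constructor <;> intro <;> omega
      rw [h3]
      have h4 : (t.count x + 1 == 3) = decide ((1 : Int) + (t.count x : Int) = 3) := by
        rw [Bool.eq_iff_iff]
        simp only [beq_iff_eq, decide_eq_true_eq]
        constructor <;> intro <;> omega
      rw [h4]
      cases found <;> cases (decide (run = 3)) <;> simp [Bool.or_comm]

theorem B_eq_goal (hand : List String) : isOneTriple_alt hand = pvGoal hand := by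
  unfold isOneTriple_alt
  have hperm : (PySem.List.sorted hand (fun x => x) false).Perm hand := PySem.List.sorted_perm ..
  have hpw : (PySem.List.sorted hand (fun x => x) false).Pairwise (fun a b => a ≤ b) := by
    simpa using PySem.List.sorted_pairwise hand (fun x => x)
  rw [← pvGoal_perm hperm]
  cases hs : PySem.List.sorted hand (fun x => x) false with
  | nil => simp [pyScan, pvGoal]
  | cons x t =>
    rw [hs] at hpw
    rcases List.pairwise_cons.mp hpw with ⟨hxt, hpt⟩
    rw [pyScan]
    simp only [Option.beq_none]
    rw [show (false || decide ((0:Int) = 3)) = false by decide]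
    rw [pyScan_eq t x 1 false hpt hxt, pvGoal_cons]
    have h4 : (t.count x + 1 == 3) = decide ((1 : Int) + (t.count x : Int) = 3) := by
      rw [Bool.eq_iff_iff]
      simp only [beq_iff_eq, decide_eq_true_eq]
      constructor <;> intro <;> omega
    rw [h4]
    simp

-- ===== VERDICT (by name: the statement is the Claim_ definition above) =====
theorem isOneTriple_spec : Claim_equal_isOneTriple := by
  intro hand _
  unfold Spec_isOneTriple
  rw [A_eq_goal, B_eq_goal]
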